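-- pv_equiv track=rewrite | github.com/xiong7569439/jpfx | src/analyzer/change_classifier.py | get_impact_level
-- ===== SOURCE A (Python) =====
-- from typing import Dict, Any, List
--
-- def get_impact_level(dimensions: List[str]) -> str:
--     """
--     根据维度判断影响级别
--
--     Returns:
--         high/medium/low
--     """
--     # 高优先级维度
--     high_dims = ['A', 'B', 'C', 'D', 'E']
--     # 中优先级维度
--     medium_dims = ['F', 'H']
--
--     for d in dimensions:
--         if d in high_dims:
--             return 'high'
--
--     for d in dimensions:
--         if d in medium_dims:
--             return 'medium'
--
--     return 'low'
-- ===== SOURCE B (Python) =====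
-- def get_impact_level(dimensions):
--     saw_medium = False
--     for d in dimensions:
--         if d in ('A', 'B', 'C', 'D', 'E'):
--             return 'high'
--         elif d in ('F', 'H'):
--             saw_medium = True
--     return 'medium' if saw_medium else 'low'
-- ===== Notes on version B (the rewrite author's own statement) =====
-- stated objective: simpler
-- what changed: Fuses A's two separate scans into a single pass that returns 'high' immediately and tracks a saw_medium flag, deciding medium/low after the loop.
import Mathlib
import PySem

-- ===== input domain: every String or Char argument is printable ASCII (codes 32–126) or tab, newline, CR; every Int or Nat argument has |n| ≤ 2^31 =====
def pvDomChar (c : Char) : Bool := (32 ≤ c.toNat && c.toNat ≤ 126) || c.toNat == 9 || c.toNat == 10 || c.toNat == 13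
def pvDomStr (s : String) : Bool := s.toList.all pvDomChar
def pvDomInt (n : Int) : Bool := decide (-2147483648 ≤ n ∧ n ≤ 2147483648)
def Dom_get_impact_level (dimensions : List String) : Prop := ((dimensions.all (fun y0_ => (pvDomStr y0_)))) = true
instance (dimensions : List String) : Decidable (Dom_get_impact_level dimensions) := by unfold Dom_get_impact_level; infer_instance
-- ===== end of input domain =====

-- B fuses A's two scans into one pass with a saw_medium flag (objective: simpler).

-- ===== PORT A =====
-- first loop: return 'high' on first high dim, else none
def pvA_scanHigh (dimensions : List String) : Option String :=
  match dimensions with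
  | [] => none
  | d :: rest =>
    if d ∈ ["A", "B", "C", "D", "E"] then some "high" else pvA_scanHigh rest

-- second loop: return 'medium' on first medium dim, else none
def pvA_scanMedium (dimensions : List String) : Option String :=
  match dimensions with
  | [] => none
  | d :: rest =>
    if d ∈ ["F", "H"] then some "medium" else pvA_scanMedium rest

def get_impact_level (dimensions : List String) : String :=
  match pvA_scanHigh dimensions with
  | some r => r
  | none =>
    match pvA_scanMedium dimensions with
    | some r => r
    | none => "low"

-- ===== PORT B =====
-- single loop carrying saw_medium
def pvB_loop (dimensions : List String) (sawMedium : Bool) : String :=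
  match dimensions with
  | [] => if sawMedium then "medium" else "low"
  | d :: rest =>
    if d ∈ ["A", "B", "C", "D", "E"] then "high"
    else if d ∈ ["F", "H"] then pvB_loop rest true
    else pvB_loop rest sawMedium

def get_impact_level_alt (dimensions : List String) : String :=
  pvB_loop dimensions false

-- ===== PRECONDITION & SPEC =====
def Spec_get_impact_level (dimensions : List String) (out : String) : Prop := out = get_impact_level_alt dimensions
instance (dimensions : List String) (out : String) : Decidable (Spec_get_impact_level dimensions out) := by unfold Spec_get_impact_level; infer_instance

-- ===== CLAIM (what is proved, stated in full; the proofs are below) =====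
def Claim_equal_get_impact_level : Prop := ∀ (dimensions : List String), Dom_get_impact_level dimensions → Spec_get_impact_level dimensions (get_impact_level dimensions)

-- ===== LEMMAS AND PROOFS =====

-- A's medium scan can only produce "medium"
lemma pvA_scanMedium_some (xs : List String) (r : String) (h : pvA_scanMedium xs = some r) : r = "medium" := by
  induction xs with
  | nil => simp [pvA_scanMedium] at h
  | cons d rest ih =>
    by_cases hm : d ∈ ["F", "H"]
    · simp [pvA_scanMedium, hm] at h; exact h.symm
    · exact ih (by simpa [pvA_scanMedium, hm] using h)

-- key invariant: the B loop equals A's composed answer with the pending flag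
lemma pvB_loop_eq (dimensions : List String) (saw : Bool) :
    pvB_loop dimensions saw =
      match pvA_scanHigh dimensions with
      | some r => r
      | none =>
        match pvA_scanMedium dimensions with
        | some r => r
        | none => if saw then "medium" else "low" := by
  induction dimensions generalizing saw with
  | nil => simp [pvB_loop, pvA_scanHigh, pvA_scanMedium]
  | cons d rest ih =>
    by_cases hh : d ∈ ["A", "B", "C", "D", "E"]
    · simp [pvB_loop, pvA_scanHigh, hh]
    · by_cases hm : d ∈ ["F", "H"]
      · simp only [pvB_loop, pvA_scanHigh, pvA_scanMedium, hh, hm, if_true, if_false]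
        rw [ih]
        cases pvA_scanHigh rest with
        | some r => rfl
        | none =>
          cases h : pvA_scanMedium rest with
          | some r => simp [pvA_scanMedium_some _ _ h]
          | none => rfl
      · simp only [pvB_loop, pvA_scanHigh, pvA_scanMedium, if_neg hh, if_neg hm]
        exact ih saw

-- ===== VERDICT (by name: the statement is the Claim_ definition above) =====
theorem get_impact_level_spec : Claim_equal_get_impact_level := by
  intro dims _
  unfold Spec_get_impact_level get_impact_level get_impact_level_alt
  rw [pvB_loop_eq]
  cases pvA_scanHigh dims <;> [skip; rfl]
  cases pvA_scanMedium dims <;> rfl
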